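-- pv_equiv track=rewrite | github.com/dkorenci/codwoe-irb-nlp | data_analysis/transformations.py | extractRemoveLabelsFrIt
-- ===== SOURCE A (Python) =====
-- def extractRemoveLabelsFrIt(gls):
--     '''
--     Extract/remove labels for french and italian.
--     Labels are at gloss start, in format: ( label1 ) [[,] ( labelK )] +
--     :param gls:
--     :return: list of lowercased labels, gloss without labels
--     '''
--     tokens = gls.split()
--     labels_exist = tokens[0] == '('
--     if not labels_exist: return [], gls
--     # extract labels
--     inside_lbl = False; label = None; labels = []
--     def_start = None
--     for i, tok in enumerate(tokens):
--         if not inside_lbl: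
--             if tok == '(':
--                 inside_lbl = True
--             elif tok == ')':
--                 #continue # ignore such rare errors
--                 raise Exception(f'misformed label part: {gls}')
--             elif tok == ',': continue # ignore commas
--             else: def_start = i; break # end of labels part
--         else:
--             if tok == ')':
--                 if label is None: raise Exception(f'parenteses closed without label inside: {gls}')
--                 labels.append(label)
--                 label = None; inside_lbl = False
--             elif tok == '(': raise Exception(f'multiple consequent open paranteses: {gls}')
--             else:
--                 if label is not None: # enable multi-token labels
--                     label = ' '.join([label, tok])
--                     #raise Exception(f'multiple label tokens: {gls}')
--                 else: label = tok
--     labels = [l.lower() for l in labels]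
--     stripped_gls = ' '.join(tokens[def_start:])
--     return labels, stripped_gls
-- ===== SOURCE B (Python) =====
-- def extractRemoveLabelsFrIt(gls):
--     tokens = gls.split()
--     if tokens[0] != '(':
--         return [], gls
--     labels = []
--     def_start = None
--     n = len(tokens)
--     i = 0
--     while i < n:
--         tok = tokens[i]
--         if tok == '(':
--             # consume one parenthesized group
--             i += 1
--             parts = []
--             while i < n and tokens[i] != ')':
--                 if tokens[i] == '(':
--                     raise Exception(f'multiple consequent open paranteses: {gls}')
--                 parts.append(tokens[i])
--                 i += 1
--             if i < n:  # saw the closing ')'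
--                 if not parts:
--                     raise Exception(f'parenteses closed without label inside: {gls}')
--                 labels.append(' '.join(parts).lower())
--                 i += 1
--             # else: group left unclosed at end of gloss; drop it silently
--         elif tok == ',':
--             i += 1
--         elif tok == ')':
--             raise Exception(f'misformed label part: {gls}')
--         else:
--             def_start = i
--             break
--     return labels, ' '.join(tokens[def_start:])
-- ===== Notes on version B (the rewrite author's own statement) =====
-- stated objective: alternative
-- what changed: A's flat single pass with inside_lbl/label state flags is replaced by a nested index-advancing parser: an inner loop consumes each parenthesized group's tokens and the label is joined and lowercased as it is emitted, so no boolean state or pending-label variable survives across tokens.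
import Mathlib
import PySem

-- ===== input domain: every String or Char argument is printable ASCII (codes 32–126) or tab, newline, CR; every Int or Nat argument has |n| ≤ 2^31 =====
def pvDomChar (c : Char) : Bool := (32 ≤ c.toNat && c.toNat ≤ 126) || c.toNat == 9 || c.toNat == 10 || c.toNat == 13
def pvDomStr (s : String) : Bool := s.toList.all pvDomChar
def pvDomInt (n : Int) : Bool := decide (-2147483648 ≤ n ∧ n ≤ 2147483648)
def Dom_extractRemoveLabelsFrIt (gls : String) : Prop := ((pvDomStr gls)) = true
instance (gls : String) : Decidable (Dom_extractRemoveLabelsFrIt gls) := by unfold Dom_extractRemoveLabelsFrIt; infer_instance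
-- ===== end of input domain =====

-- B replaces A's flat one-pass boolean state machine by a nested index-advancing parser
-- (inner loop per parenthesized group, labels lowercased as they are emitted); objective: alternative.

-- ===== PORT A =====
-- A's for-loop over enumerate(tokens) with state (inside_lbl, label, labels, def_start).
-- Where the Python raises (excluded by Pre_) the port returns (labels, none), i.e. the
-- same shape as falling off the end of the loop; those inputs are outside Pre_.
def aLoop (ts : List String) (i : Nat) (inside : Bool) (label : Option String)
    (labels : List String) : List String × Option Nat :=
  match ts with
  | [] => (labels, none)
  | tok :: rest =>
    match inside with
    | false =>
      if tok = "(" then aLoop rest (i+1) true label labels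
      else if tok = ")" then (labels, none)        -- Python: raise (outside Pre_)
      else if tok = "," then aLoop rest (i+1) false label labels
      else (labels, some i)                        -- def_start = i; break
    | true =>
      if tok = ")" then
        match label with
        | none => (labels, none)                   -- Python: raise (outside Pre_)
        | some l => aLoop rest (i+1) false none (labels ++ [l])
      else if tok = "(" then (labels, none)        -- Python: raise (outside Pre_)
      else
        match label with
        | some l => aLoop rest (i+1) true (some (PySem.Str.join " " [l, tok])) labels
        | none => aLoop rest (i+1) true (some tok) labels

def extractRemoveLabelsFrIt (gls : String) : List String × String :=
  let tokens := PySem.Str.split₀ gls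
  match tokens with
  | [] => ([], gls)                                -- Python: IndexError (outside Pre_)
  | t0 :: _ =>
    if t0 = "(" then
      let r := aLoop tokens 0 false none []
      (r.1.map PySem.Str.lower,
       PySem.Str.join " " (match r.2 with | none => tokens | some i => tokens.drop i))
    else ([], gls)

-- ===== PORT B =====
-- B's inner while-loop collecting one group's tokens; three outcomes.
inductive BInnerRes where
  | raiseErr : BInnerRes                            -- Python: raise on nested '(' (outside Pre_)
  | unclosed : BInnerRes                            -- hit end of tokens before ')'
  | closed : List String → Nat → List String → BInnerRes  -- rest after ')', next i, collected parts

def bInner (ts : List String) (i : Nat) (parts : List String) : BInnerRes :=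
  match ts with
  | [] => .unclosed
  | tok :: rest =>
    if tok = ")" then .closed rest (i+1) parts
    else if tok = "(" then .raiseErr
    else bInner rest (i+1) (parts ++ [tok])

-- termination fact for the outer loop: the inner loop consumes at least the ')'
theorem bInner_closed_length {ts : List String} {i : Nat} {parts rest' : List String} {i' : Nat}
    {ps : List String} (h : bInner ts i parts = .closed rest' i' ps) :
    rest'.length < ts.length := by
  induction ts generalizing i parts with
  | nil => simp [bInner] at h
  | cons tok rest ih =>
    simp only [bInner] at h
    by_cases h1 : tok = ")"
    · rw [if_pos h1] at h; cases h; simp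
    · rw [if_neg h1] at h
      by_cases h2 : tok = "("
      · rw [if_pos h2] at h; cases h
      · rw [if_neg h2] at h
        exact Nat.lt_trans (ih h) (by simp)

mutual
def bOuter (ts : List String) (i : Nat) (labels : List String) : List String × Option Nat :=
  match ts with
  | [] => (labels, none)
  | tok :: rest =>
    if tok = "(" then bFromInner rest (i+1) [] labels
    else if tok = "," then bOuter rest (i+1) labels
    else if tok = ")" then (labels, none)          -- Python: raise (outside Pre_)
    else (labels, some i)                          -- def_start = i; break
termination_by ts.length

def bFromInner (ts : List String) (i : Nat) (parts : List String)
    (labels : List String) : List String × Option Nat :=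
  match hh : bInner ts i parts with
  | .raiseErr => (labels, none)                    -- Python: raise (outside Pre_)
  | .unclosed => (labels, none)                    -- unclosed group dropped silently
  | .closed rest' i' ps =>
    if ps = [] then (labels, none)                 -- Python: raise (outside Pre_)
    else bOuter rest' i' (labels ++ [PySem.Str.lower (PySem.Str.join " " ps)])
termination_by ts.length
decreasing_by exact bInner_closed_length hh
end

def extractRemoveLabelsFrIt_alt (gls : String) : List String × String :=
  let tokens := PySem.Str.split₀ gls
  match tokens with
  | [] => ([], gls)                                -- Python: IndexError (outside Pre_)
  | t0 :: _ =>
    if t0 ≠ "(" then ([], gls)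
    else
      let r := bOuter tokens 0 []
      (r.1,
       PySem.Str.join " " (match r.2 with | none => tokens | some i => tokens.drop i))

-- ===== PRECONDITION & SPEC =====
-- The label-part GRAMMAR (a regular language over the four token classes '(' ')' ',' other),
-- written as one boolean membership test per nonterminal. It carries none of the ports' state
-- (no labels, no index, no accumulator): outside groups a '(' opens a group, ')' is malformed,
-- ',' is skipped, any other token ends the label part (everything after is unconstrained); the
-- first token inside a group may be neither '(' (nested open) nor ')' (empty label); further
-- group tokens run until ')' (running off the end unclosed is accepted).
mutual
def pvLabelPart : List String → Bool
  | [] => true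
  | tok :: rest =>
    if tok = "(" then pvGroupHead rest
    else if tok = ")" then false
    else if tok = "," then pvLabelPart rest
    else true
def pvGroupHead : List String → Bool
  | [] => true
  | tok :: rest => if tok = ")" ∨ tok = "(" then false else pvGroupTail rest
def pvGroupTail : List String → Bool
  | [] => true
  | tok :: rest =>
    if tok = ")" then pvLabelPart rest
    else if tok = "(" then false
    else pvGroupTail rest
end

-- Pre_ excludes exactly the inputs where A raises: an empty/whitespace-only gloss
-- (IndexError on tokens[0]) and glosses starting with '(' whose label part is malformed
-- (A's three explicit raises). A returns on every input admitted here.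
def Pre_extractRemoveLabelsFrIt (gls : String) : Prop :=
  PySem.Str.split₀ gls ≠ [] ∧
  ((PySem.Str.split₀ gls).headD "" = "(" → pvLabelPart (PySem.Str.split₀ gls) = true)
instance (gls : String) : Decidable (Pre_extractRemoveLabelsFrIt gls) := by
  unfold Pre_extractRemoveLabelsFrIt; infer_instance

def pvWitness_extractRemoveLabelsFrIt : String := "( a ) b"

def Spec_extractRemoveLabelsFrIt (gls : String) (out : List String × String) : Prop := out = extractRemoveLabelsFrIt_alt gls
instance (gls : String) (out : List String × String) : Decidable (Spec_extractRemoveLabelsFrIt gls out) := by unfold Spec_extractRemoveLabelsFrIt; infer_instance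

-- ===== CLAIM (what is proved, stated in full; the proofs are below) =====
def Claim_equal_extractRemoveLabelsFrIt : Prop := ∀ (gls : String), Dom_extractRemoveLabelsFrIt gls → Pre_extractRemoveLabelsFrIt gls → Spec_extractRemoveLabelsFrIt gls (extractRemoveLabelsFrIt gls)

-- ===== LEMMAS AND PROOFS =====

-- A's label accumulator as a function of B's collected parts
def optJoin (parts : List String) : Option String :=
  match parts with
  | [] => none
  | _ => some (PySem.Str.join " " parts)

theorem chars_join_append_singleton (sep : List Char) (ps : List (List Char))
    (t : List Char) (h : ps ≠ []) :
    PySem.Chars.join sep (ps ++ [t]) = PySem.Chars.join sep ps ++ sep ++ t := by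
  induction ps with
  | nil => simp at h
  | cons a ps ih =>
    cases ps with
    | nil => simp [PySem.Chars.join_cons_cons, PySem.Chars.join_singleton]
    | cons b qs =>
      simp only [List.cons_append, PySem.Chars.join_cons_cons]
      have ihx := ih (by simp)
      simp only [List.cons_append] at ihx
      rw [ihx]
      simp [List.append_assoc]

theorem join_append_singleton (ps : List String) (t : String) (hps : ps ≠ []) :
    PySem.Str.join " " (ps ++ [t]) =
      PySem.Str.join " " [PySem.Str.join " " ps, t] := by
  simp only [PySem.Str.join, List.map_append, List.map_cons, List.map_nil]
  rw [chars_join_append_singleton _ _ _ (by simpa using hps)]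
  simp [PySem.Chars.join_cons_cons, PySem.Chars.join_singleton, List.append_assoc]

theorem bFromInner_nil (i : Nat) (parts labels : List String) :
    bFromInner [] i parts labels = (labels, none) := by
  rw [bFromInner]
  split <;> simp_all [bInner]

theorem bFromInner_cons_close (rest : List String) (i : Nat) (parts labels : List String) :
    bFromInner (")" :: rest) i parts labels =
      if parts = [] then (labels, none)
      else bOuter rest (i+1) (labels ++ [PySem.Str.lower (PySem.Str.join " " parts)]) := by
  have e : bInner (")" :: rest) i parts = .closed rest (i+1) parts := by simp [bInner]
  rw [bFromInner, e]

theorem bFromInner_cons_open (rest : List String) (i : Nat) (parts labels : List String) :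
    bFromInner ("(" :: rest) i parts labels = (labels, none) := by
  have e : bInner ("(" :: rest) i parts = .raiseErr := by simp [bInner]
  rw [bFromInner, e]

theorem bFromInner_cons_other (tok : String) (rest : List String) (i : Nat)
    (parts labels : List String) (h1 : tok ≠ ")") (h2 : tok ≠ "(") :
    bFromInner (tok :: rest) i parts labels = bFromInner rest (i+1) (parts ++ [tok]) labels := by
  have e : bInner (tok :: rest) i parts = bInner rest (i+1) (parts ++ [tok]) := by
    simp [bInner, h1, h2]
  rw [bFromInner, bFromInner, e]

theorem loops_eq (n : Nat) : ∀ ts : List String, ts.length ≤ n →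
    (∀ i labelsA, bOuter ts i (labelsA.map PySem.Str.lower) =
      ((aLoop ts i false none labelsA).1.map PySem.Str.lower,
       (aLoop ts i false none labelsA).2)) ∧
    (∀ i parts labelsA, bFromInner ts i parts (labelsA.map PySem.Str.lower) =
      ((aLoop ts i true (optJoin parts) labelsA).1.map PySem.Str.lower,
       (aLoop ts i true (optJoin parts) labelsA).2)) := by
  induction n with
  | zero =>
    intro ts hlen
    have hts : ts = [] := List.length_eq_zero_iff.mp (Nat.le_zero.mp hlen)
    subst hts
    exact ⟨fun i labelsA => by simp [bOuter, aLoop],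
           fun i parts labelsA => by simp [bFromInner_nil, aLoop]⟩
  | succ n ih =>
    intro ts hlen
    cases ts with
    | nil =>
      exact ⟨fun i labelsA => by simp [bOuter, aLoop],
             fun i parts labelsA => by simp [bFromInner_nil, aLoop]⟩
    | cons tok rest =>
      have hrest : rest.length ≤ n := by
        simpa using Nat.lt_succ_iff.mp (Nat.lt_of_lt_of_le (by simp) hlen)
      obtain ⟨ihO, ihI⟩ := ih rest hrest
      constructor
      · intro i labelsA
        by_cases h1 : tok = "("
        · subst h1
          rw [bOuter]
          simp only [aLoop, reduceIte]
          exact ihI (i+1) [] labelsA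
        · by_cases h2 : tok = ")"
          · subst h2
            rw [bOuter]
            simp [aLoop, h1]
          · by_cases h3 : tok = ","
            · subst h3
              rw [bOuter]
              simp only [aLoop, if_neg h1, if_neg h2, reduceIte]
              exact ihO (i+1) labelsA
            · rw [bOuter]
              simp [aLoop, h1, h2, h3]
      · intro i parts labelsA
        by_cases h1 : tok = ")"
        · subst h1
          rw [bFromInner_cons_close]
          by_cases hp : parts = []
          · subst hp
            simp [aLoop, optJoin]
          · rw [if_neg hp]
            have : optJoin parts = some (PySem.Str.join " " parts) := by
              cases parts with
              | nil => exact absurd rfl hp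
              | cons a l => rfl
            simp only [aLoop, this, reduceIte]
            have := ihO (i+1) (labelsA ++ [PySem.Str.join " " parts])
            simpa [List.map_append] using this
        · by_cases h2 : tok = "("
          · subst h2
            rw [bFromInner_cons_open]
            simp [aLoop]
          · rw [bFromInner_cons_other _ _ _ _ _ h1 h2]
            cases parts with
            | nil =>
              simp only [aLoop, if_neg h1, if_neg h2, optJoin]
              have e2 : optJoin ([] ++ [tok]) = some tok := by
                simp [optJoin, PySem.Str.join, PySem.Chars.join_singleton]
              have hx := ihI (i+1) ([] ++ [tok]) labelsA
              rw [e2] at hx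
              exact hx
            | cons a l' =>
              simp only [aLoop, if_neg h1, if_neg h2, optJoin]
              have e2 : optJoin ((a :: l') ++ [tok]) =
                  some (PySem.Str.join " " [PySem.Str.join " " (a :: l'), tok]) := by
                simp only [optJoin]
                rw [← join_append_singleton _ _ (by simp : (a :: l') ≠ [])]
                rfl
              have hx := ihI (i+1) ((a :: l') ++ [tok]) labelsA
              rw [e2] at hx
              exact hx

theorem witness_ok : Dom_extractRemoveLabelsFrIt pvWitness_extractRemoveLabelsFrIt ∧
    Pre_extractRemoveLabelsFrIt pvWitness_extractRemoveLabelsFrIt := by decide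

-- ===== VERDICT (by name: the statement is the Claim_ definition above) =====
theorem extractRemoveLabelsFrIt_spec : Claim_equal_extractRemoveLabelsFrIt := by
  intro gls _ _
  unfold Spec_extractRemoveLabelsFrIt extractRemoveLabelsFrIt extractRemoveLabelsFrIt_alt
  cases h : PySem.Str.split₀ gls with
  | nil => rfl
  | cons t0 rest =>
    simp only
    by_cases h0 : t0 = "("
    · subst h0
      have hb := ((loops_eq ("(" :: rest).length ("(" :: rest) le_rfl).1 0 [])
      simp only [List.map_nil] at hb
      simp only [reduceIte, ne_eq, not_true_eq_false, if_false, hb]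
    · simp [h0]
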